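-- pv_equiv track=rewrite | github.com/barium-sulphate/IP-Assignment | IP_Assignment_3/2024492_Q1.py | bottom
-- ===== SOURCE A (Python) =====
-- def bottom(count,n,collect):
--     if count==n+1:
--         return []
--     temp=""
--     temp+=count*"* "
--     temp+=(n-count)*"  "
--     cont=temp[0:len(temp)-1]
--     temp+=cont[::-1]
--     collect.append(temp)
--     bottom(count+1,n,collect)
--     return collect
-- ===== SOURCE B (Python) =====
-- def bottom(count, n, collect):
--     # Iterative re-implementation: one for-loop over range(count, n+1) instead of
--     # recursion; appends the same lines to collect (same mutation) and returns collect.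
--     for c in range(count, n + 1):
--         temp = c * "* " + (n - c) * "  "
--         cont = temp[0:len(temp) - 1]
--         temp += cont[::-1]
--         collect.append(temp)
--     return collect
-- ===== Notes on version B (the rewrite author's own statement) =====
-- stated objective: idiomatic
-- what changed: Replaces the self-recursive call that mutates the accumulator with a single for-loop over range(count, n+1), keeping the per-line string construction identical.
-- intended difference: When count == n+1 and collect is nonempty, A returns the stale base-case [] while the caller's list is untouched; B returns collect itself, the intended 'nothing to add' result, since for every other count A returns the (mutated) collect. — e.g. on bottom(3, 2, ["x"]): A returns [], B returns ["x"]
import Mathlib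
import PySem

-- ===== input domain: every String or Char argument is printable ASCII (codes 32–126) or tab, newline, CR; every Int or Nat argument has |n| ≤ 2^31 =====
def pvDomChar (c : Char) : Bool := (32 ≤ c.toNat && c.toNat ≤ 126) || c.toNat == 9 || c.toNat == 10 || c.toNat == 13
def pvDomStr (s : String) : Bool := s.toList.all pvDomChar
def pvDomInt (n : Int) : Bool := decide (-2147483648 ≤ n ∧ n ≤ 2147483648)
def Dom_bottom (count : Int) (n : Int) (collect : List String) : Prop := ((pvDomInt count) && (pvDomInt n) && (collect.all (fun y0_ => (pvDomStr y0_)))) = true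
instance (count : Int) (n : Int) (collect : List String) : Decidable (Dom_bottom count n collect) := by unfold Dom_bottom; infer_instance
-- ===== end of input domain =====

-- B replaces A's accumulator-mutating recursion by one for-loop over range(count, n+1)
-- (same per-line string construction, same appends to collect); equivalence is about the
-- RETURN value — both Pythons append the same lines to the collect argument in place.

-- ===== PORT A =====
-- per-line construction, shared verbatim by both Pythons:
-- temp = count*"* " + (n-count)*"  "; cont = temp[0:len(temp)-1]; temp += cont[::-1]
-- (cont[::-1] ported as List.reverse, exact by PySem.List.slice?_none_none_neg_one)
def pyLine (c : Int) (n : Int) : String :=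
  let temp : List Char :=
    PySem.List.pyRepeat ['*', ' '] c ++ PySem.List.pyRepeat [' ', ' '] (n - c)
  let cont : List Char := PySem.List.slice temp (some 0) (some ((temp.length : Int) - 1))
  String.ofList (temp ++ cont.reverse)

-- A's recursion; fuel (n+1-count).toNat counts the remaining Python self-calls
-- (fuel 0 with count ≠ n+1 is Python's RecursionError region, excluded by Pre_).
def bottomGo : Nat → Int → Int → List String → List String
  | 0, _, _, collect => collect
  | fuel + 1, count, n, collect =>
    if count = n + 1 then collect
    else bottomGo fuel (count + 1) n (collect ++ [pyLine count n])

def bottom (count : Int) (n : Int) (collect : List String) : List String :=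
  if count = n + 1 then [] else bottomGo (n + 1 - count).toNat count n collect

-- ===== PORT B =====
def bottom_alt (count : Int) (n : Int) (collect : List String) : List String :=
  (PySem.List.pyRange count (n + 1) 1).foldl (fun acc c => acc ++ [pyLine c n]) collect

-- ===== PRECONDITION & SPEC =====
-- Pre_ excludes count > n+1, where Python A recurses without bound (RecursionError).
def Pre_bottom (count : Int) (n : Int) (collect : List String) : Prop := count ≤ n + 1
instance (count : Int) (n : Int) (collect : List String) : Decidable (Pre_bottom count n collect) := by unfold Pre_bottom; infer_instance
def pvWitness_bottom : Int × Int × List String := (1, 3, [])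

-- When count = n+1 and collect ≠ [], A hits its base case and returns the stale literal []
-- although for every other count it returns the (mutated) collect; B returns collect itself,
-- the intended 'nothing to add' value.
def D_bottom (count : Int) (n : Int) (collect : List String) : Prop := count = n + 1 ∧ collect ≠ []
instance (count : Int) (n : Int) (collect : List String) : Decidable (D_bottom count n collect) := by unfold D_bottom; infer_instance

def Spec_bottom (count : Int) (n : Int) (collect : List String) (out : List String) : Prop := ¬ D_bottom count n collect → out = bottom_alt count n collect
instance (count : Int) (n : Int) (collect : List String) (out : List String) : Decidable (Spec_bottom count n collect out) := by unfold Spec_bottom; infer_instance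

def pvDiffWitness_bottom : Int × Int × List String := (3, 2, ["x"])
def pvDiffWitnessOut_bottom : (List String) × (List String) := ([], ["x"])

-- ===== CLAIM (what is proved, stated in full; the proofs are below) =====
def Claim_unchanged_bottom : Prop := ∀ (count : Int) (n : Int) (collect : List String), Dom_bottom count n collect → Pre_bottom count n collect → Spec_bottom count n collect (bottom count n collect)
def Claim_changed_bottom : Prop := Dom_bottom (pvDiffWitness_bottom.1) (pvDiffWitness_bottom.2.1) (pvDiffWitness_bottom.2.2) ∧ Pre_bottom (pvDiffWitness_bottom.1) (pvDiffWitness_bottom.2.1) (pvDiffWitness_bottom.2.2) ∧ D_bottom (pvDiffWitness_bottom.1) (pvDiffWitness_bottom.2.1) (pvDiffWitness_bottom.2.2) ∧ bottom (pvDiffWitness_bottom.1) (pvDiffWitness_bottom.2.1) (pvDiffWitness_bottom.2.2) = pvDiffWitnessOut_bottom.1 ∧ bottom_alt (pvDiffWitness_bottom.1) (pvDiffWitness_bottom.2.1) (pvDiffWitness_bottom.2.2) = pvDiffWitnessOut_bottom.2 ∧ pvDiffWitnessOut_bottom.1 ≠ pvDiffWitnessOut_bottom.2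
def Claim_exact_bottom : Prop := ∀ (count : Int) (n : Int) (collect : List String), Dom_bottom count n collect → Pre_bottom count n collect → D_bottom count n collect → bottom count n collect ≠ bottom_alt count n collect

-- ===== LEMMAS AND PROOFS =====

-- A's recursion with exactly the right fuel equals B's fold over range(count, n+1).
lemma bottomGo_eq_foldl (n : Int) : ∀ (k : Nat) (c : Int) (acc : List String),
    (n + 1 - c).toNat = k →
    bottomGo k c n acc
      = (PySem.List.pyRange c (n + 1) 1).foldl (fun a x => a ++ [pyLine x n]) acc := by
  intro k
  induction k with
  | zero =>
    intro c acc h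
    have hc : n + 1 ≤ c := by omega
    rw [PySem.List.pyRange_one_eq_nil hc]
    rfl
  | succ k ih =>
    intro c acc h
    have hc : c < n + 1 := by omega
    have hne : c ≠ n + 1 := by omega
    rw [PySem.List.pyRange_one_cons hc]
    simp only [bottomGo, if_neg hne, List.foldl_cons]
    exact ih (c + 1) (acc ++ [pyLine c n]) (by omega)

-- ===== VERDICT (by name: the statement is the Claim_ definition above) =====
theorem bottom_spec : Claim_unchanged_bottom := by
  intro count n collect _ hpre hnd
  by_cases hc : count = n + 1
  · have hcol : collect = [] := by
      by_contra hne
      exact hnd ⟨hc, hne⟩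
    subst hc hcol
    simp [bottom, bottom_alt, PySem.List.pyRange_one_eq_nil (le_refl (n + 1))]
  · unfold bottom bottom_alt
    rw [if_neg hc]
    exact bottomGo_eq_foldl n _ count collect rfl

theorem bottom_changed : Claim_changed_bottom := by unfold Claim_changed_bottom; decide

theorem bottom_tight : Claim_exact_bottom := by
  intro count n collect _ _ hd
  obtain ⟨hc, hcol⟩ := hd
  subst hc
  unfold bottom bottom_alt
  rw [if_pos rfl, PySem.List.pyRange_one_eq_nil (le_refl (n + 1))]
  simpa using fun h => hcol h
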